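-- pv_equiv track=rewrite | github.com/fela/advent-of-code | 2023/17.py | last_segment
-- ===== SOURCE A (Python) =====
-- def last_segment(path):
--     same_dir = []
--     for d in reversed(path):
--         if d == path[-1]:
--             same_dir.append(d)
--         else:
--             break
--     return tuple(same_dir)
-- ===== SOURCE B (Python) =====
-- def last_segment(path):
--     if not path:
--         return ()
--     last = path[-1]
--     start = 0
--     for i, d in enumerate(path):
--         if d != last:
--             start = i + 1
--     return tuple(path[start:])
-- ===== Notes on version B (the rewrite author's own statement) =====
-- stated objective: alternative
-- what changed: B computes the start of the trailing run by a full forward pass (recording position after the last mismatch via enumerate) and returns path[start:], instead of A's backward scan with early break collecting equal elements.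
import Mathlib
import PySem

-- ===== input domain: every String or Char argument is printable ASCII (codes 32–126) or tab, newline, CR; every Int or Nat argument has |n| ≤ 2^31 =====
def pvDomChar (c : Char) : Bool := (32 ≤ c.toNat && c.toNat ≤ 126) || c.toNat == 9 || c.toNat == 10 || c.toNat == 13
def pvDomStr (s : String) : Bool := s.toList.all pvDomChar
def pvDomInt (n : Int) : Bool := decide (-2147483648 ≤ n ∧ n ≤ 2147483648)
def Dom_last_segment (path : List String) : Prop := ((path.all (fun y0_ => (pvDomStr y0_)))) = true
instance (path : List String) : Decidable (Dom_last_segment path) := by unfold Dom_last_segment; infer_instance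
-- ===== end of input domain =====

-- B replaces A's backward scan-with-break by a forward pass that records the
-- position after the last mismatch, then slices; objective: alternative decomposition.

-- ===== PORT A =====
-- the 'for d in reversed(path): if d == path[-1]: append else break' loop
def lastSegGo (path : List String) : List String → List String → List String
  | acc, [] => acc
  | acc, d :: rest =>
      if some d = PySem.List.pyGet? path (-1) then lastSegGo path (acc ++ [d]) rest else acc

def last_segment (path : List String) : List String :=
  lastSegGo path [] path.reverse

-- ===== PORT B =====
def last_segment_alt (path : List String) : List String :=
  match PySem.List.pyGet? path (-1) with
  | none => []   -- 'if not path: return ()'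
  | some last =>
      let start :=
        (PySem.List.enumerate path 0).foldl
          (fun s p => if p.2 ≠ last then p.1 + 1 else s) 0
      PySem.List.slice path (some start) none

-- ===== PRECONDITION & SPEC =====
def Spec_last_segment (path : List String) (out : List String) : Prop := out = last_segment_alt path
instance (path : List String) (out : List String) : Decidable (Spec_last_segment path out) := by unfold Spec_last_segment; infer_instance

-- ===== CLAIM (what is proved, stated in full; the proofs are below) =====
def Claim_equal_last_segment : Prop := ∀ (path : List String), Dom_last_segment path → Spec_last_segment path (last_segment path)

-- ===== LEMMAS AND PROOFS =====

-- A's loop collects the takeWhile-prefix of the reversed list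
theorem lastSegGo_eq (path : List String) (l acc : List String) :
    lastSegGo path acc l =
      acc ++ l.takeWhile (fun d => decide (some d = PySem.List.pyGet? path (-1))) := by
  induction l generalizing acc with
  | nil => simp [lastSegGo]
  | cons d rest ih =>
      by_cases h : some d = PySem.List.pyGet? path (-1)
      · simp [lastSegGo, h, ih]
      · simp [lastSegGo, h]

-- B's forward foldl computes length minus the trailing-run length
theorem foldl_start_eq (last : String) (l : List String) :
    (PySem.List.enumerate l 0).foldl (fun s p => if p.2 ≠ last then p.1 + 1 else s) 0
      = (l.length : Int) - (l.reverse.takeWhile (fun d => decide (d = last))).length := by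
  induction l using List.reverseRecOn with
  | nil => simp
  | append_singleton l' x ih =>
      rw [PySem.List.enumerate_append, List.foldl_append, ih]
      by_cases h : x = last
      · simp [PySem.List.enumerate, h]
      · simp [PySem.List.enumerate, h]

-- all elements of this takeWhile equal `last`, so it is its own reverse
theorem takeWhile_eq_reverse_self (last : String) (l : List String) :
    (l.takeWhile (fun d => decide (d = last))).reverse
      = l.takeWhile (fun d => decide (d = last)) := by
  have hrep : l.takeWhile (fun d => decide (d = last))
      = List.replicate (l.takeWhile (fun d => decide (d = last))).length last := by
    apply List.eq_replicate_of_mem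
    intro b hb
    have := List.mem_takeWhile_imp hb
    simpa using this
  rw [hrep, List.reverse_replicate]

-- ===== VERDICT (by name: the statement is the Claim_ definition above) =====
theorem last_segment_spec : Claim_equal_last_segment := by
  intro path _
  unfold Spec_last_segment last_segment last_segment_alt
  rcases hlast : PySem.List.pyGet? path (-1) with _ | last
  · -- path is empty
    have : path = [] := by
      rw [PySem.List.pyGet?_neg_one] at hlast
      exact List.getLast?_eq_none_iff.mp hlast
    simp [this, lastSegGo]
  · rw [lastSegGo_eq]
    simp only [List.nil_append]
    have hpred : (fun d => decide (some d = PySem.List.pyGet? path (-1)))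
        = (fun d => decide (d = last)) := by
      funext d; rw [hlast]; simp
    rw [hpred, foldl_start_eq last path]
    have hk : (path.reverse.takeWhile (fun d => decide (d = last))).length ≤ path.length :=
      le_of_le_of_eq (List.takeWhile_prefix _).length_le path.length_reverse
    set k := (path.reverse.takeWhile (fun d => decide (d = last))).length with hkdef
    have hcast : (path.length : Int) - (k : Int) = ((path.length - k : Nat) : Int) := by omega
    rw [hcast, PySem.List.slice_from_natCast]
    -- drop (n - k) path = reverse of the first k elements of path.reverse
    have htake : path.reverse.take k = path.reverse.takeWhile (fun d => decide (d = last)) :=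
      (List.prefix_iff_eq_take.mp (List.takeWhile_prefix _)).symm
    have hdrop : path.drop (path.length - k) = (path.reverse.take k).reverse := by
      have : path.rtake k = (path.reverse.take k).reverse :=
        List.rtake_eq_reverse_take_reverse path k
      simpa [List.rtake] using this
    rw [hdrop, htake, takeWhile_eq_reverse_self]
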